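-- pv_equiv track=rewrite | github.com/Albert-learner/codetree-TILs | 240619/1차원 폭발 게임/The-1D-bomb-game.py | get_consecutive_counts
-- ===== SOURCE A (Python) =====
-- def get_consecutive_counts(bombs):
--     n = len(bombs)
--     consecutive_cnts = [0] * n
--     cnts = 0
--     for i in range(n - 1, 0, -1):
--         if bombs[i] == bombs[i - 1]:
--             cnts += 1
--         else:
--             cnts = 0
--         consecutive_cnts[i] = cnts
--
--     return consecutive_cnts
-- ===== SOURCE B (Python) =====
-- def get_consecutive_counts(bombs):
--     res = []
--     i, n = 0, len(bombs)
--     while i < n: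
--         j = i + 1
--         while j < n and bombs[j] == bombs[i]:
--             j += 1
--         res.append(0)
--         res.extend(range(j - i - 1, 0, -1))
--         i = j
--     return res
-- ===== Notes on version B (the rewrite author's own statement) =====
-- stated objective: alternative
-- what changed: Instead of a backward pass carrying a running equal-neighbour counter, B splits the list into maximal runs of equal values left-to-right and emits the closed-form block [0, L-1, ..., 1] for each run of length L.
import Mathlib
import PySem

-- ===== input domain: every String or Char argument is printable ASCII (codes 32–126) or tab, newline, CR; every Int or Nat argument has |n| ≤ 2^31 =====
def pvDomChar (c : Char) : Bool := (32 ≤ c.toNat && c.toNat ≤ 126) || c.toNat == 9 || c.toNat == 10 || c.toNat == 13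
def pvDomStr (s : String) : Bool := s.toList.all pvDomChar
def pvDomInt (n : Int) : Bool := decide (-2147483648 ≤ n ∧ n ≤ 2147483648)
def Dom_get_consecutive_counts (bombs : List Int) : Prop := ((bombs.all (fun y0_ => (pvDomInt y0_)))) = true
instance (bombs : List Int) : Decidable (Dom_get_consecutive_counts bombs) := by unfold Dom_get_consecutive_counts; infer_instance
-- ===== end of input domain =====

-- B builds the answer run-by-run from a closed form per maximal equal run, instead of A's
-- backward pass with a running counter; same cost, different decomposition (objective: alternative).

-- ===== PORT A =====
def get_consecutive_counts (bombs : List Int) : List Int :=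
  let n : Int := bombs.length
  let res := (PySem.List.pyRange (n - 1) 0 (-1)).foldl
    (fun (st : List Int × Int) i =>
      let cnts : Int :=
        if PySem.List.pyGetD bombs i 0 = PySem.List.pyGetD bombs (i - 1) 0 then st.2 + 1 else 0
      (PySem.List.pySetD st.1 i cnts, cnts))
    (List.replicate bombs.length 0, 0)
  res.1

-- ===== PORT B =====
-- run-by-run: take the maximal leading run of values equal to the head, emit 0 :: [L-1, …, 1], recurse
def altGo : List Int → List Int
  | [] => []
  | x :: rest =>
    ((0 : Int) :: PySem.List.pyRange (((rest.takeWhile (fun y => y == x)).length : Nat) : Int) 0 (-1)) ++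
      altGo (rest.dropWhile (fun y => y == x))
termination_by l => l.length
decreasing_by
  simp only [List.length_cons]
  exact Nat.lt_succ_of_le (List.length_dropWhile_le _ _)

def get_consecutive_counts_alt (bombs : List Int) : List Int := altGo bombs

-- ===== PRECONDITION & SPEC =====
def Spec_get_consecutive_counts (bombs : List Int) (out : List Int) : Prop := out = get_consecutive_counts_alt bombs
instance (bombs : List Int) (out : List Int) : Decidable (Spec_get_consecutive_counts bombs out) := by unfold Spec_get_consecutive_counts; infer_instance

-- ===== CLAIM (what is proved, stated in full; the proofs are below) =====
def Claim_equal_get_consecutive_counts : Prop := ∀ (bombs : List Int), Dom_get_consecutive_counts bombs → Spec_get_consecutive_counts bombs (get_consecutive_counts bombs)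

-- ===== LEMMAS AND PROOFS =====

-- reference: counts for a list given its left neighbour `prev`
def eqlen (x : Int) (l : List Int) : Nat := (l.takeWhile (fun y => y == x)).length

def ref (prev : Int) : List Int → List Int
  | [] => []
  | x :: rest => (if x = prev then (eqlen x rest : Int) + 1 else 0) :: ref x rest

theorem ref_length (prev : Int) (l : List Int) : (ref prev l).length = l.length := by
  induction l generalizing prev with
  | nil => rfl
  | cons x rest ih => simp [ref, ih]


theorem eqlen_cast (x y : Int) (t : List Int) :
    ((eqlen x (y :: t) : Nat) : Int) = (ref x (y :: t)).getD 0 0 := by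
  by_cases h : y = x
  · subst h
    simp [eqlen, ref, List.takeWhile]
  · have hb : (y == x) = false := by simp [h]
    simp [eqlen, ref, List.takeWhile, hb, h]

theorem ref_rec : ∀ (l : List Int) (prev : Int) (i : Nat), i < l.length →
    (ref prev l).getD i 0 =
      if l.getD i 0 = (if i = 0 then prev else l.getD (i-1) 0)
      then (if i + 1 < l.length then (ref prev l).getD (i+1) 0 else 0) + 1
      else 0 := by
  intro l
  induction l with
  | nil => intro prev i h; simp at h
  | cons x rest ih =>
    intro prev i hi
    cases i with
    | zero =>
      cases rest with
      | nil => simp [ref, eqlen, List.takeWhile]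
      | cons y t =>
        by_cases hxp : x = prev
        · have hE' : ((eqlen x (y :: t) : Nat) : Int) = if y = x then ((eqlen y t : Nat) : Int) + 1 else 0 := by
            rw [eqlen_cast]; simp [ref]
          have hlt : (0:Nat) + 1 < t.length + 1 + 1 := by omega
          subst hxp
          simp [ref, hE', hlt]
        · simp [ref, hxp]
    | succ j =>
      have hj : j < rest.length := by simpa using Nat.lt_of_succ_lt_succ hi
      have := ih x j hj
      cases j with
      | zero =>
        simpa [ref, List.getD_cons_succ, List.getD_cons_zero, Nat.succ_lt_succ_iff] using this
      | succ jj =>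
        simpa [ref, List.getD_cons_succ, Nat.succ_lt_succ_iff] using this

theorem ref_split : ∀ (rest : List Int) (x : Int),
    ref x rest = PySem.List.pyRange ((eqlen x rest : Nat) : Int) 0 (-1) ++
      (match rest.dropWhile (fun y => y == x) with
       | [] => ([] : List Int)
       | y :: t => (0:Int) :: ref y t) := by
  intro rest
  induction rest with
  | nil => intro x; simp [ref, eqlen, PySem.List.pyRange_neg_one_eq_nil]
  | cons y t ih =>
    intro x
    by_cases h : y = x
    · subst h
      have he : eqlen y (y :: t) = eqlen y t + 1 := by
        simp [eqlen, List.takeWhile]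
      have hcons : PySem.List.pyRange ((eqlen y t + 1 : Nat) : Int) 0 (-1)
          = ((eqlen y t + 1 : Nat) : Int) :: PySem.List.pyRange ((eqlen y t : Nat) : Int) 0 (-1) := by
        rw [PySem.List.pyRange_neg_one_cons (by exact_mod_cast Nat.succ_pos _)]
        congr 1
        push_cast
        ring
      have hd : (y :: t).dropWhile (fun z => z == y) = t.dropWhile (fun z => z == y) := by
        simp [List.dropWhile]
      rw [he, hcons, hd]
      simp only [ref]
      rw [ih y]
      push_cast
      simp
    · have he : eqlen x (y :: t) = 0 := by
        simp [eqlen, List.takeWhile, show (y == x) = false from by simp [h]]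
      have hd : (y :: t).dropWhile (fun z => z == x) = y :: t := by
        simp [List.dropWhile, show (y == x) = false from by simp [h]]
      rw [he, hd]
      simp [ref, h, PySem.List.pyRange_neg_one_eq_nil]

theorem altGo_cons_ref : ∀ (n : Nat) (x : Int) (rest : List Int), rest.length ≤ n →
    altGo (x :: rest) = (0:Int) :: ref x rest := by
  intro n
  induction n with
  | zero =>
    intro x rest hl
    have h0 : rest = [] := List.eq_nil_of_length_eq_zero (Nat.le_zero.mp hl)
    subst h0
    simp [altGo, ref, PySem.List.pyRange_neg_one_eq_nil]
  | succ n ih =>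
    intro x rest hl
    rw [altGo]
    cases hd : rest.dropWhile (fun y => y == x) with
    | nil =>
      simp [altGo, ref_split rest x, hd, eqlen]
    | cons y t =>
      have ht : t.length ≤ n := by
        have h1 := List.length_dropWhile_le (fun y => y == x) rest
        rw [hd] at h1
        simp at h1
        omega
      rw [ih y t ht]
      simp [ref_split rest x, hd, eqlen]

theorem a_loop (bombs full : List Int) (hf : full.length = bombs.length)
    (hrec : ∀ i : Nat, 1 ≤ i → i < bombs.length →
      full.getD i 0 = if bombs.getD i 0 = bombs.getD (i-1) 0
        then (if i + 1 < bombs.length then full.getD (i+1) 0 else 0) + 1 else 0) :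
    ∀ (m : Nat), m < bombs.length → ∀ (arr : List Int) (c : Int),
      arr.length = bombs.length →
      c = (if m + 1 < bombs.length then full.getD (m+1) 0 else 0) →
      (∀ i : Nat, m < i → i < bombs.length → arr.getD i 0 = full.getD i 0) →
      arr.getD 0 0 = full.getD 0 0 →
      ((PySem.List.pyRange (m : Int) 0 (-1)).foldl
        (fun (st : List Int × Int) i =>
          let cnts : Int := if PySem.List.pyGetD bombs i 0 = PySem.List.pyGetD bombs (i - 1) 0 then st.2 + 1 else 0
          (PySem.List.pySetD st.1 i cnts, cnts)) (arr, c)).1 = full := by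
  intro m
  induction m with
  | zero =>
    intro _ arr c hlen _ hinv h0
    rw [PySem.List.pyRange_neg_one_eq_nil (by norm_num)]
    simp only [List.foldl_nil]
    apply List.ext_getElem (by omega)
    intro i hi _
    have hgd : arr.getD i 0 = full.getD i 0 := by
      cases i with
      | zero => exact h0
      | succ j => exact hinv (j+1) (Nat.succ_pos j) (by omega)
    rwa [List.getD_eq_getElem _ _ hi, List.getD_eq_getElem _ _ (by omega)] at hgd
  | succ k ih =>
    intro hm arr c hlen hc hinv h0
    rw [PySem.List.pyRange_neg_one_cons (by exact_mod_cast Nat.succ_pos k), List.foldl_cons]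
    have hcast : (((k+1:Nat)):Int) - 1 = ((k:Nat):Int) := by push_cast; ring
    have hc' : (if PySem.List.pyGetD bombs (((k+1:Nat)):Int) 0 = PySem.List.pyGetD bombs ((((k+1:Nat)):Int) - 1) 0 then c + 1 else 0)
        = full.getD (k+1) 0 := by
      rw [hcast, PySem.List.pyGetD_natCast, PySem.List.pyGetD_natCast,
        hrec (k+1) (Nat.succ_pos k) hm]
      subst hc
      simp
    change (List.foldl
        (fun (st : List Int × Int) i =>
          let cnts : Int := if PySem.List.pyGetD bombs i 0 = PySem.List.pyGetD bombs (i - 1) 0 then st.2 + 1 else 0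
          (PySem.List.pySetD st.1 i cnts, cnts))
        (PySem.List.pySetD arr (((k+1:Nat)):Int)
            (if PySem.List.pyGetD bombs (((k+1:Nat)):Int) 0 = PySem.List.pyGetD bombs ((((k+1:Nat)):Int) - 1) 0 then c + 1 else 0),
          (if PySem.List.pyGetD bombs (((k+1:Nat)):Int) 0 = PySem.List.pyGetD bombs ((((k+1:Nat)):Int) - 1) 0 then c + 1 else 0))
        (PySem.List.pyRange ((((k+1:Nat)):Int) - 1) 0 (-1))).1 = full
    rw [hc', PySem.List.pySetD_natCast, hcast]
    apply ih (by omega)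
    · simp [hlen]
    · rw [if_pos hm]
    · intro i hik hin
      rcases Nat.lt_or_ge (k+1) i with hlt | hge
      · rw [List.getD_eq_getElem?_getD, List.getElem?_set_ne (by omega), ← List.getD_eq_getElem?_getD]
        exact hinv i hlt hin
      · have : i = k + 1 := by omega
        subst this
        rw [List.getD_eq_getElem?_getD, List.getElem?_set_self (by omega), Option.getD_some]
    · rw [List.getD_eq_getElem?_getD, List.getElem?_set_ne (by omega), ← List.getD_eq_getElem?_getD]
      exact h0

theorem full_rec (x : Int) (rest : List Int) : ∀ i : Nat, 1 ≤ i → i < (x::rest).length →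
    ((0:Int) :: ref x rest).getD i 0 =
      if (x::rest).getD i 0 = (x::rest).getD (i-1) 0
      then (if i + 1 < (x::rest).length then ((0:Int) :: ref x rest).getD (i+1) 0 else 0) + 1
      else 0 := by
  intro i h1 hi
  cases i with
  | zero => omega
  | succ j =>
    have hj : j < rest.length := by simpa using Nat.lt_of_succ_lt_succ hi
    have := ref_rec rest x j hj
    cases j with
    | zero =>
      simpa [List.getD_cons_succ, List.getD_cons_zero, Nat.succ_lt_succ_iff] using this
    | succ jj =>
      simpa [List.getD_cons_succ, Nat.succ_lt_succ_iff] using this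

-- ===== VERDICT (by name: the statement is the Claim_ definition above) =====
theorem get_consecutive_counts_spec : Claim_equal_get_consecutive_counts := by
  intro bombs _
  unfold Spec_get_consecutive_counts get_consecutive_counts get_consecutive_counts_alt
  cases bombs with
  | nil =>
    change (List.foldl
        (fun (st : List Int × Int) i =>
          let cnts : Int := if PySem.List.pyGetD ([] : List Int) i 0 = PySem.List.pyGetD ([] : List Int) (i - 1) 0 then st.2 + 1 else 0
          (PySem.List.pySetD st.1 i cnts, cnts))
        (List.replicate 0 (0:Int), 0)
        (PySem.List.pyRange ((0:Int) - 1) 0 (-1))).1 = altGo []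
    rw [PySem.List.pyRange_neg_one_eq_nil (by norm_num)]
    simp [altGo]
  | cons x rest =>
    change (List.foldl
        (fun (st : List Int × Int) i =>
          let cnts : Int := if PySem.List.pyGetD (x :: rest) i 0 = PySem.List.pyGetD (x :: rest) (i - 1) 0 then st.2 + 1 else 0
          (PySem.List.pySetD st.1 i cnts, cnts))
        (List.replicate (x :: rest).length (0:Int), 0)
        (PySem.List.pyRange (((x :: rest).length : Int) - 1) 0 (-1))).1 = altGo (x :: rest)
    rw [altGo_cons_ref rest.length x rest (le_refl _)]
    rw [show (((x :: rest).length : Int) - 1) = ((rest.length : Nat) : Int) from by simp]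
    apply a_loop (x :: rest) ((0:Int) :: ref x rest)
      (by simp [ref_length]) (full_rec x rest) rest.length (by simp)
    · simp
    · rw [if_neg (by simp)]
    · intro i hik hin
      simp at hin
      omega
    · simp
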